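-- pv_equiv track=rewrite | github.com/SamuelVanie/IA-algo-demo-theoreme | app/bin/main/refutation.py | segment_sentence
-- ===== SOURCE A (Python) =====
-- PROPOSITIONAL_OPERATORS = ["!", "&", "|", ">", "=", "(", ")"]
--
-- def is_propositional_op(op):
--     """
--     Returns whether op is propositional operator or not.
--     @param op (str)
--     : Operator
--     """
--     return op in PROPOSITIONAL_OPERATORS
--
-- def segment_sentence(sentence):
--     segmented_sentence = []
--
--     i = 0
--     L = len(sentence)
--
--     while i < L:
--         if is_propositional_op(sentence[i]):
--             segmented_sentence.append(sentence[i])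
--             i += 1
--         elif sentence[i] == " ":
--             i += 1
--         else:
--             literal = ""
--             while i < L and not is_propositional_op(sentence[i]) and sentence[i] != " ":
--                 literal += sentence[i]
--                 i += 1
--             segmented_sentence.append(literal)
--
--     return segmented_sentence
-- ===== SOURCE B (Python) =====
-- OPS = "!&|>=()"
--
-- def segment_sentence(sentence):
--     tokens = []
--     lit = ""
--     for ch in sentence:
--         if ch in OPS:
--             if lit:
--                 tokens.append(lit)
--                 lit = ""
--             tokens.append(ch)
--         elif ch == " ":
--             if lit:
--                 tokens.append(lit)
--                 lit = ""
--         else: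
--             lit += ch
--     if lit:
--         tokens.append(lit)
--     return tokens
-- ===== Notes on version B (the rewrite author's own statement) =====
-- stated objective: alternative
-- what changed: B replaces A's index-driven outer while with a nested literal-accumulating inner while by a single for-each-character pass that carries a pending-literal accumulator and flushes it at operator/space boundaries and at the end.
import Mathlib
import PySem

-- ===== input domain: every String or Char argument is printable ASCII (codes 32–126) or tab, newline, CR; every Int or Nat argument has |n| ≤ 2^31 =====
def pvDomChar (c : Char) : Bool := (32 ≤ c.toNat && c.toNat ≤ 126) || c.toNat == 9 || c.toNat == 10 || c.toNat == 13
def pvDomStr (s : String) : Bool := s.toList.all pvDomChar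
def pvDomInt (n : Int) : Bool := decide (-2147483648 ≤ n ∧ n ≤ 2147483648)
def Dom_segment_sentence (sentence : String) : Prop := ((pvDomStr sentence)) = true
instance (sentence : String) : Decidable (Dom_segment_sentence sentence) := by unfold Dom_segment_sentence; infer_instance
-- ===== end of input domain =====

-- B replaces A's index-driven while loop (with a nested literal-collecting while) by a
-- single fold over the characters carrying a pending-literal accumulator ("alternative").

-- ===== PORT A =====
-- A's is_propositional_op: membership in PROPOSITIONAL_OPERATORS (sentence[i] is a 1-char string; ported as Char)
def is_propositional_op (c : Char) : Bool :=
  (['!', '&', '|', '>', '=', '(', ')'] : List Char).contains c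

-- A's inner while: accumulate literal while char is neither operator nor space
def segTakeLit (lit : String) : List Char → String × List Char
  | [] => (lit, [])
  | c :: rest =>
    if is_propositional_op c = false ∧ c ≠ ' ' then segTakeLit (lit.push c) rest
    else (lit, c :: rest)

theorem segTakeLit_len : ∀ (l : List Char) (lit : String),
    (segTakeLit lit l).2.length ≤ l.length := by
  intro l
  induction l with
  | nil => intro lit; simp [segTakeLit]
  | cons c rest ih =>
    intro lit
    simp only [segTakeLit]
    split
    · exact Nat.le_trans (ih _) (Nat.le_succ _)
    · simp

-- A's outer while over the remaining characters
def segCore : List Char → List String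
  | [] => []
  | c :: rest =>
    if is_propositional_op c then String.mk [c] :: segCore rest
    else if c = ' ' then segCore rest
    else (segTakeLit "" (c :: rest)).1 :: segCore (segTakeLit "" (c :: rest)).2
termination_by l => l.length
decreasing_by
  · simp
  · simp
  · simp only [segTakeLit, *]
    rename_i h1 h2
    rw [if_pos ⟨by simpa using h1, h2⟩]
    exact Nat.lt_succ_of_le (segTakeLit_len rest _)

def segment_sentence (sentence : String) : List String :=
  segCore sentence.toList

-- ===== PORT B =====
-- B's operator test: ch in "!&|>=()"
def segIsOp (c : Char) : Bool := "!&|>=()".toList.contains c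

-- B's loop body: flush the pending literal at operator/space boundaries, else extend it
def segStep (acc : List String × String) (c : Char) : List String × String :=
  if segIsOp c then
    ((if acc.2 = "" then acc.1 else acc.1 ++ [acc.2]) ++ [String.mk [c]], "")
  else if c = ' ' then
    (if acc.2 = "" then acc.1 else acc.1 ++ [acc.2], "")
  else
    (acc.1, acc.2.push c)

-- B's trailing flush: if lit: tokens.append(lit)
def segFinish (acc : List String × String) : List String :=
  if acc.2 = "" then acc.1 else acc.1 ++ [acc.2]

def segment_sentence_alt (sentence : String) : List String :=
  segFinish (sentence.toList.foldl segStep ([], ""))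

-- ===== PRECONDITION & SPEC =====
def Spec_segment_sentence (sentence : String) (out : List String) : Prop := out = segment_sentence_alt sentence
instance (sentence : String) (out : List String) : Decidable (Spec_segment_sentence sentence out) := by unfold Spec_segment_sentence; infer_instance

-- ===== CLAIM (what is proved, stated in full; the proofs are below) =====
def Claim_equal_segment_sentence : Prop := ∀ (sentence : String), Dom_segment_sentence sentence → Spec_segment_sentence sentence (segment_sentence sentence)

-- ===== LEMMAS AND PROOFS =====

theorem segIsOp_eq (c : Char) : segIsOp c = is_propositional_op c := by
  simp [segIsOp, is_propositional_op]

theorem push_ne_empty (s : String) (c : Char) : s.push c ≠ "" := by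
  intro h
  have := congrArg String.toList h
  simp at this

-- the token prefix is only appended to by the fold
theorem segStep_prefix : ∀ (l : List Char) (T : List String) (lit : String),
    l.foldl segStep (T, lit) =
      (T ++ (l.foldl segStep ([], lit)).1, (l.foldl segStep ([], lit)).2) := by
  intro l
  induction l with
  | nil => intro T lit; simp
  | cons c rest ih =>
    intro T lit
    have hstep : segStep (T, lit) c =
        (T ++ (segStep ([], lit) c).1, (segStep ([], lit) c).2) := by
      simp only [segStep]
      split_ifs <;> simp
    simp only [List.foldl_cons, hstep]
    rw [ih, ih (segStep ([], lit) c).1]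
    simp

-- flushing a pending nonempty literal matches A's inner while
theorem seg_flush : ∀ (l : List Char) (lit : String), lit ≠ "" →
    segFinish (l.foldl segStep ([], lit)) =
      (segTakeLit lit l).1 ::
        segFinish ((segTakeLit lit l).2.foldl segStep ([], "")) := by
  intro l
  induction l with
  | nil => intro lit h; simp [segTakeLit, segFinish, h]
  | cons c rest ih =>
    intro lit h
    by_cases hop : is_propositional_op c = true
    · have hs : segStep ([], lit) c = ([lit, String.mk [c]], "") := by
        simp [segStep, segIsOp_eq, hop, h]
      have ht : segTakeLit lit (c :: rest) = (lit, c :: rest) := by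
        simp [segTakeLit, hop]
      simp only [List.foldl_cons, hs, ht]
      rw [segStep_prefix rest [lit, String.mk [c]] ""]
      have hs2 : segStep ([], "") c = ([String.mk [c]], "") := by
        simp [segStep, segIsOp_eq, hop]
      simp only [hs2]
      rw [segStep_prefix rest [String.mk [c]] ""]
      simp [segFinish]
      split <;> simp
    · by_cases hsp : c = ' '
      · subst hsp
        have hs : segStep ([], lit) ' ' = ([lit], "") := by
          simp [segStep, segIsOp_eq, h, is_propositional_op]
        have ht : segTakeLit lit (' ' :: rest) = (lit, ' ' :: rest) := by
          simp only [segTakeLit]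
          rw [if_neg]
          simp
        simp only [List.foldl_cons, hs, ht]
        rw [segStep_prefix rest [lit] ""]
        have hs2 : segStep ([], "") ' ' = ([], "") := by
          simp [segStep, segIsOp_eq, hop]
        simp only [hs2]
        simp [segFinish]
        split <;> simp
      · have hs : segStep ([], lit) c = ([], lit.push c) := by
          simp [segStep, segIsOp_eq, hop, hsp]
        have ht : segTakeLit lit (c :: rest) = segTakeLit (lit.push c) rest := by
          simp [segTakeLit, hop, hsp]
        simp only [List.foldl_cons, hs, ht]
        exact ih _ (push_ne_empty lit c)

theorem segFinish_append (T X : List String) (lit : String) :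
    segFinish (T ++ X, lit) = T ++ segFinish (X, lit) := by
  simp only [segFinish]
  split <;> simp

-- main: B's fold computes A's segmentation
theorem seg_main : ∀ (l : List Char),
    segFinish (l.foldl segStep ([], "")) = segCore l := by
  intro l
  induction l using segCore.induct with
  | case1 => simp [segCore, segFinish]
  | case2 c rest hop ih =>
    have hs : segStep ([], "") c = ([String.mk [c]], "") := by
      simp [segStep, segIsOp_eq, hop]
    rw [segCore, if_pos hop]
    simp only [List.foldl_cons, hs]
    rw [segStep_prefix rest [String.mk [c]] "", segFinish_append, ih]
    simp
  | case3 rest hop ih =>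
    have hs : segStep ([], "") ' ' = ([], "") := by
      simp [segStep, segIsOp_eq, hop]
    rw [segCore, if_neg hop, if_pos rfl]
    simp only [List.foldl_cons, hs, ih]
  | case4 c rest hop hsp ih =>
    have hs : segStep ([], "") c = ([], String.push "" c) := by
      simp [segStep, segIsOp_eq, hop, hsp]
    have ht : segTakeLit "" (c :: rest) = segTakeLit (String.push "" c) rest := by
      simp [segTakeLit, hop, hsp]
    rw [segCore, if_neg hop, if_neg hsp]
    simp only [List.foldl_cons, hs]
    rw [seg_flush rest (String.push "" c) (push_ne_empty "" c), ← ht, ih]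

-- ===== VERDICT (by name: the statement is the Claim_ definition above) =====
theorem segment_sentence_spec : Claim_equal_segment_sentence := by
  intro sentence _
  unfold Spec_segment_sentence segment_sentence segment_sentence_alt
  exact (seg_main sentence.toList).symm
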